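-- pv_equiv track=rewrite | github.com/c-box/LANKA | case_based/case_utils.py | get_type_rank
-- ===== SOURCE A (Python) =====
-- def get_type_rank(obj, topk_token, relation_token):
--     rank = 1
--     for token in topk_token:
--         if token == obj:
--             return rank
--         if token in relation_token:
--             rank += 1
--     return rank
-- ===== SOURCE B (Python) =====
-- def get_type_rank(obj, topk_token, relation_token):
--     # locate the boundary, then count relation members in the prefix
--     try:
--         idx = topk_token.index(obj)
--     except ValueError:
--         idx = len(topk_token)
--     rel = set(relation_token)
--     return 1 + sum(1 for t in topk_token[:idx] if t in rel)
-- ===== Notes on version B (the rewrite author's own statement) =====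
-- stated objective: alternative
-- what changed: Replaces the single early-returning loop that interleaves the equality test and the membership-counting branch by a locate-then-aggregate structure: find the first index of obj (len if absent), then count relation members in that prefix with a prebuilt set.
import Mathlib
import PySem

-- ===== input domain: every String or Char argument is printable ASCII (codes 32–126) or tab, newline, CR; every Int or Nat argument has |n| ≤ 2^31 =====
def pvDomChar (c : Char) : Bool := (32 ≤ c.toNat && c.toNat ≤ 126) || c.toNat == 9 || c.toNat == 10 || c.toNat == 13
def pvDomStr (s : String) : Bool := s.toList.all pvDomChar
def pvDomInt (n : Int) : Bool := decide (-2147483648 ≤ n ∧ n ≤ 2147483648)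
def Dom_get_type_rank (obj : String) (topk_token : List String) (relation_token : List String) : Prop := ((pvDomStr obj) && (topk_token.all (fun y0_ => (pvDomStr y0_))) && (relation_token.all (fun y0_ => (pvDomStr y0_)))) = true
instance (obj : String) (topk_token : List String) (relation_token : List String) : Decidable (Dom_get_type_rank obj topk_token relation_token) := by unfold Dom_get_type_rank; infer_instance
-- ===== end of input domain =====

-- B replaces A's single early-returning loop by locate-the-boundary then count-the-prefix (alternative decomposition; return value equivalence).


-- ===== PORT A =====
def get_type_rank_go (obj : String) (relation_token : List String) : List String → Int → Int
  | [], rank => rank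
  | token :: rest, rank =>
    if token == obj then rank
    else if relation_token.contains token then get_type_rank_go obj relation_token rest (rank + 1)
    else get_type_rank_go obj relation_token rest rank

def get_type_rank (obj : String) (topk_token : List String) (relation_token : List String) : Int :=
  get_type_rank_go obj relation_token topk_token 1

-- ===== PORT B =====
def get_type_rank_alt (obj : String) (topk_token : List String) (relation_token : List String) : Int :=
  let idx : Nat := (PySem.List.index? topk_token obj).getD topk_token.length
  let rel := PySem.Set.ofList relation_token
  1 + ((topk_token.take idx).countP (fun t => rel.contains t) : Int)

-- ===== PRECONDITION & SPEC =====
def Spec_get_type_rank (obj : String) (topk_token : List String) (relation_token : List String) (out : Int) : Prop := out = get_type_rank_alt obj topk_token relation_token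
instance (obj : String) (topk_token : List String) (relation_token : List String) (out : Int) : Decidable (Spec_get_type_rank obj topk_token relation_token out) := by unfold Spec_get_type_rank; infer_instance

-- ===== CLAIM (what is proved, stated in full; the proofs are below) =====
def Claim_equal_get_type_rank : Prop := ∀ (obj : String) (topk_token : List String) (relation_token : List String), Dom_get_type_rank obj topk_token relation_token → Spec_get_type_rank obj topk_token relation_token (get_type_rank obj topk_token relation_token)

-- ===== LEMMAS AND PROOFS =====

-- A's loop computes rank + (count of relation members in the prefix before the first obj)
theorem go_eq (obj : String) (relation_token : List String) (xs : List String) (rank : Int) :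
    get_type_rank_go obj relation_token xs rank =
      rank + ((xs.take ((PySem.List.index? xs obj).getD xs.length)).countP
        (fun t => relation_token.contains t) : Int) := by
  induction xs generalizing rank with
  | nil => simp [get_type_rank_go, PySem.List.index?]
  | cons x rest ih =>
    by_cases hx : x = obj
    · subst hx
      rw [PySem.List.index?_cons_self]
      simp [get_type_rank_go]
    · have hne : (x == obj) = false := by simp [hx]
      rw [PySem.List.index?_cons_of_ne rest hx]
      cases h : PySem.List.index? rest obj with
      | none =>
        simp only [get_type_rank_go, hne, Bool.false_eq_true, if_false, Option.map_none,
          Option.getD_none, List.length_cons, List.take_succ_cons, List.countP_cons]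
        rw [ih rank, ih (rank+1), h]
        simp
        split_ifs <;> ring
      | some k =>
        simp only [get_type_rank_go, hne, Bool.false_eq_true, if_false, Option.map_some,
          Option.getD_some, List.take_succ_cons, List.countP_cons]
        rw [ih rank, ih (rank+1), h]
        simp
        split_ifs <;> ring

-- ===== VERDICT (by name: the statement is the Claim_ definition above) =====
theorem get_type_rank_spec : Claim_equal_get_type_rank := by
  intro obj topk relation _
  unfold Spec_get_type_rank get_type_rank get_type_rank_alt
  rw [go_eq]
  simp
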